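-- pv_equiv track=rewrite | github.com/Drills-hub/codes | 백준/Bronze/10471. 공간을 만들어 봅시다/공간을 만들어 봅시다.py | find_meeting_room_sizes
-- ===== SOURCE A (Python) =====
-- def find_meeting_room_sizes(W, P, partition_positions):
--     positions = [0] + partition_positions + [W]
--     possible_sizes = set()
--     for i in range(len(positions)):
--         for j in range(i+1, len(positions)):
--             possible_sizes.add(positions[j] - positions[i])
--     result = sorted(possible_sizes)
--     return result
-- ===== SOURCE B (Python) =====
-- def find_meeting_room_sizes(W, P, partition_positions):
--     positions = [0] + partition_positions + [W]
--     first = {}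
--     last = {}
--     for idx, v in enumerate(positions):
--         if v not in first:
--             first[v] = idx
--         last[v] = idx
--     return sorted({q - p for p in first for q in last if first[p] < last[q]})
-- ===== Notes on version B (the rewrite author's own statement) =====
-- stated objective: alternative
-- what changed: Instead of enumerating all O(n^2) index pairs, B makes one pass recording each value's first and last occurrence index in two dicts, then emits q-p for each pair of DISTINCT values with first[p] < last[q], which is O(n + d^2) for d distinct positions (correct because a pair i<j with positions[i]=p, positions[j]=q exists iff the first occurrence of p precedes the last occurrence of q).
import Mathlib
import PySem

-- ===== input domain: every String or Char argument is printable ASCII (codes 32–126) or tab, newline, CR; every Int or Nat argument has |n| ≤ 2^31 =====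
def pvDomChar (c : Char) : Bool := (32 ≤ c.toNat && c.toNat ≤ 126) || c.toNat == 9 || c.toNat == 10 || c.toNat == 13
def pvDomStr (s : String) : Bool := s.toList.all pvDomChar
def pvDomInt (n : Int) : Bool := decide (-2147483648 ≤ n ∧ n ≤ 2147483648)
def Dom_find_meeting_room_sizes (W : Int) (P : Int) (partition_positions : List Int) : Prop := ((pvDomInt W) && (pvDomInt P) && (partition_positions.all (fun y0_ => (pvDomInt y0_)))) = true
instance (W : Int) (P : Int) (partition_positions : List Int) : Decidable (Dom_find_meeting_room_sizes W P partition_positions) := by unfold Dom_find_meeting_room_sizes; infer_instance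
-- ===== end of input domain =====

-- B replaces A's scan of all O(n^2) index pairs by first/last-occurrence dicts and a scan
-- over pairs of DISTINCT values (objective: alternative; same worst-case cost).


-- ===== PORT A =====
def find_meeting_room_sizes (W : Int) (P : Int) (partition_positions : List Int) : List Int :=
  let positions : List Int := [0] ++ partition_positions ++ [W]
  let n : Int := (positions.length : Int)
  let possible_sizes : PySem.Set Int :=
    (PySem.List.pyRange 0 n 1).foldl (fun s i =>
      (PySem.List.pyRange (i+1) n 1).foldl (fun s j =>
        PySem.Set.add s (PySem.List.pyGetD positions j 0 - PySem.List.pyGetD positions i 0)) s)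
      PySem.Set.empty
  PySem.List.sorted possible_sizes (fun x => x) false

-- ===== PORT B =====
def find_meeting_room_sizes_alt (W : Int) (P : Int) (partition_positions : List Int) : List Int :=
  let positions : List Int := [0] ++ partition_positions ++ [W]
  let fl : PySem.Dict Int Int × PySem.Dict Int Int :=
    (PySem.List.enumerate positions).foldl
      (fun st iv =>
        ((if st.1.contains iv.2 then st.1 else st.1.insert iv.2 iv.1), st.2.insert iv.2 iv.1))
      (PySem.Dict.empty, PySem.Dict.empty)
  let diffs : PySem.Set Int :=
    fl.1.keys.foldl (fun s p =>
      fl.2.keys.foldl (fun s q =>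
        if fl.1.getD p 0 < fl.2.getD q 0 then PySem.Set.add s (q - p) else s) s)
      PySem.Set.empty
  PySem.List.sorted diffs (fun x => x) false

-- ===== PRECONDITION & SPEC =====
def Spec_find_meeting_room_sizes (W : Int) (P : Int) (partition_positions : List Int) (out : List Int) : Prop := out = find_meeting_room_sizes_alt W P partition_positions
instance (W : Int) (P : Int) (partition_positions : List Int) (out : List Int) : Decidable (Spec_find_meeting_room_sizes W P partition_positions out) := by unfold Spec_find_meeting_room_sizes; infer_instance

-- ===== CLAIM (what is proved, stated in full; the proofs are below) =====
def Claim_equal_find_meeting_room_sizes : Prop := ∀ (W : Int) (P : Int) (partition_positions : List Int), Dom_find_meeting_room_sizes W P partition_positions → Spec_find_meeting_room_sizes W P partition_positions (find_meeting_room_sizes W P partition_positions)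

-- ===== LEMMAS AND PROOFS =====

-- "d is a difference q - p of two elements of l with p strictly earlier than q"
def PairDiff (d : Int) : List Int → Prop
  | [] => False
  | x :: xs => (∃ p ∈ xs, d = p - x) ∨ PairDiff d xs

-- index of the first / last occurrence of v (proof-side helpers)
def firstIdx? (v : Int) : List Int → Option Nat
  | [] => none
  | x :: xs => if x = v then some 0 else (firstIdx? v xs).map (· + 1)

def lastIdx? (v : Int) : List Int → Option Nat
  | [] => none
  | x :: xs =>
    match lastIdx? v xs with
    | some k => some (k + 1)
    | none => if x = v then some 0 else none

-- membership in a fold whose step only grows the set, elementwise described by Q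
theorem mem_foldl_grow {α : Type} (step : PySem.Set Int → α → PySem.Set Int) (Q : α → Int → Prop)
    (hstep : ∀ s x d, d ∈ step s x ↔ d ∈ s ∨ Q x d) (l : List α) (init : PySem.Set Int) (d : Int) :
    d ∈ l.foldl step init ↔ d ∈ init ∨ ∃ x ∈ l, Q x d := by
  induction l generalizing init with
  | nil => simp
  | cons x xs ih =>
    simp only [List.foldl_cons, ih, hstep]
    constructor
    · rintro ((h | h) | ⟨y, hy, hQ⟩)
      · exact Or.inl h
      · exact Or.inr ⟨x, by simp, h⟩
      · exact Or.inr ⟨y, by simp [hy], hQ⟩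
    · rintro (h | ⟨y, hy, hQ⟩)
      · exact Or.inl (Or.inl h)
      · rcases List.mem_cons.mp hy with rfl | hy
        · exact Or.inl (Or.inr hQ)
        · exact Or.inr ⟨y, hy, hQ⟩

theorem nodup_foldl_grow {α : Type} (step : PySem.Set Int → α → PySem.Set Int)
    (hstep : ∀ s x, s.Nodup → (step s x).Nodup) (l : List α) (init : PySem.Set Int)
    (h : init.Nodup) : (l.foldl step init).Nodup := by
  induction l generalizing init with
  | nil => exact h
  | cons x xs ih => exact ih _ (hstep _ _ h)

-- membership in A's set, via Int indices and then PairDiff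
theorem pairdiff_iff_nat (d : Int) (l : List Int) :
    PairDiff d l ↔ ∃ i j : ℕ, i < j ∧ j < l.length ∧ d = l.getD j 0 - l.getD i 0 := by
  induction l with
  | nil => simp [PairDiff]
  | cons x xs ih =>
    simp only [PairDiff, ih]
    constructor
    · rintro (⟨p, hp, rfl⟩ | ⟨i, j, hij, hj, rfl⟩)
      · rcases List.mem_iff_getElem.mp hp with ⟨k, hk, rfl⟩
        refine ⟨0, k + 1, by omega, by simp; omega, ?_⟩
        have hg : xs[k]?.getD 0 = xs[k] := by simp [List.getElem?_eq_getElem hk]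
        simp [List.getD_cons_succ, hg, List.getD]
      · exact ⟨i + 1, j + 1, by omega, by simp; omega, by simp [List.getD_cons_succ]⟩
    · rintro ⟨i, j, hij, hj, rfl⟩
      cases i with
      | zero =>
        cases j with
        | zero => omega
        | succ j =>
          refine Or.inl ⟨xs.getD j 0, ?_, by simp [List.getD_cons_succ]⟩
          have hj' : j < xs.length := by simp at hj; omega
          rw [List.getD_eq_getElem xs 0 hj']; exact List.getElem_mem hj'
      | succ i =>
        cases j with
        | zero => omega
        | succ j =>
          exact Or.inr ⟨i, j, by omega, by simp at hj; omega, by simp [List.getD_cons_succ]⟩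

theorem mem_setA (l : List Int) (d : Int) :
    d ∈ (PySem.List.pyRange 0 (l.length : Int) 1).foldl (fun s i =>
      (PySem.List.pyRange (i+1) (l.length : Int) 1).foldl (fun s j =>
        PySem.Set.add s (PySem.List.pyGetD l j 0 - PySem.List.pyGetD l i 0)) s)
      PySem.Set.empty ↔ PairDiff d l := by
  rw [mem_foldl_grow _ (fun i d => ∃ j ∈ PySem.List.pyRange (i+1) (l.length : Int) 1,
        d = PySem.List.pyGetD l j 0 - PySem.List.pyGetD l i 0)
      (fun s i d => mem_foldl_grow _ (fun j d => d = PySem.List.pyGetD l j 0 - PySem.List.pyGetD l i 0)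
        (fun s j d => by simp [PySem.Set.mem_add]) _ s d)]
  rw [pairdiff_iff_nat]
  simp only [PySem.Set.empty, List.not_mem_nil, false_or, PySem.List.mem_pyRange_one]
  constructor
  · rintro ⟨i, ⟨hi0, hin⟩, j, ⟨hji, hjn⟩, rfl⟩
    refine ⟨Int.toNat i, Int.toNat j, by omega, by omega, ?_⟩
    rw [PySem.List.pyGetD_of_nonneg l 0 (by omega : (0:Int) ≤ j),
        PySem.List.pyGetD_of_nonneg l 0 (by omega : (0:Int) ≤ i)]
  · rintro ⟨i, j, hij, hj, rfl⟩
    refine ⟨(i : Int), ⟨by omega, by omega⟩, (j : Int), ⟨by omega, by omega⟩, ?_⟩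
    rw [PySem.List.pyGetD_natCast, PySem.List.pyGetD_natCast]

-- the "first" dict after the fold: keeps an existing binding, else first occurrence offset by s
theorem first_fold_get (l : List Int) (s : Int) (d : PySem.Dict Int Int) (v : Int) :
    ((PySem.List.enumerate l s).foldl
        (fun d iv => if d.contains iv.2 then d else d.insert iv.2 iv.1) d).get? v =
      match d.get? v with
      | some i => some i
      | none => (firstIdx? v l).map (fun k => s + (k : Int)) := by
  induction l generalizing s d with
  | nil => simp [PySem.List.enumerate, firstIdx?]; cases d.get? v <;> simp
  | cons x xs ih =>
    rw [PySem.List.enumerate_cons, List.foldl_cons, ih]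
    by_cases hc : d.contains x
    · simp only [hc, if_true]
      cases hdv : d.get? v with
      | some i => simp
      | none =>
        have hxv : x ≠ v := by
          intro h; subst h
          rw [PySem.Dict.contains_eq_isSome_get?, hdv] at hc; simp at hc
        simp [firstIdx?, hxv, Option.map_map]
        cases firstIdx? v xs <;> simp <;> ring_nf
    · rw [Bool.not_eq_true] at hc
      simp only [hc, Bool.false_eq_true, if_false]
      by_cases hxv : x = v
      · subst hxv
        rw [PySem.Dict.get?_insert_self]
        have : d.get? x = none := by
          rw [PySem.Dict.contains_eq_isSome_get?] at hc
          cases h : d.get? x <;> simp [h] at hc ⊢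
        simp [this, firstIdx?]
      · rw [PySem.Dict.get?_insert_of_ne _ _ (fun h => hxv h.symm)]
        cases hdv : d.get? v with
        | some i => simp
        | none =>
          simp [firstIdx?, hxv, Option.map_map]
          cases firstIdx? v xs <;> simp <;> ring_nf
  
-- the "last" dict after the fold: last occurrence offset by s, else the existing binding
theorem last_fold_get (l : List Int) (s : Int) (d : PySem.Dict Int Int) (v : Int) :
    ((PySem.List.enumerate l s).foldl (fun d iv => d.insert iv.2 iv.1) d).get? v =
      match lastIdx? v l with
      | some k => some (s + (k : Int))
      | none => d.get? v := by
  induction l generalizing s d with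
  | nil => simp [PySem.List.enumerate, lastIdx?]
  | cons x xs ih =>
    rw [PySem.List.enumerate_cons, List.foldl_cons, ih]
    cases hlx : lastIdx? v xs with
    | some k => simp [lastIdx?, hlx]; ring_nf
    | none =>
      by_cases hxv : x = v
      · subst hxv
        simp [lastIdx?, hlx, PySem.Dict.get?_insert_self]
      · simp [lastIdx?, hlx, hxv, PySem.Dict.get?_insert_of_ne _ _ (fun h => hxv h.symm)]

-- firstIdx?/lastIdx? basic facts
theorem firstIdx?_isSome_iff (v : Int) (l : List Int) : (firstIdx? v l).isSome ↔ v ∈ l := by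
  induction l with
  | nil => simp [firstIdx?]
  | cons x xs ih =>
    by_cases h : x = v
    · simp [firstIdx?, h]
    · simp only [firstIdx?, h, if_false, Option.isSome_map, ih, List.mem_cons]
      constructor
      · exact Or.inr
      · rintro (rfl | hh)
        · exact absurd rfl h
        · exact hh

theorem lastIdx?_isSome_iff (v : Int) (l : List Int) : (lastIdx? v l).isSome ↔ v ∈ l := by
  induction l with
  | nil => simp [lastIdx?]
  | cons x xs ih =>
    cases hlx : lastIdx? v xs with
    | some k =>
      simp only [lastIdx?, hlx, Option.isSome_some, true_iff]
      exact List.mem_cons_of_mem x (ih.mp (by simp [hlx]))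
    | none =>
      have hnm : v ∉ xs := fun hh => by
        rw [← ih] at hh; simp [hlx] at hh
      by_cases h : x = v
      · simp [lastIdx?, hlx, h]
      · simp only [lastIdx?, hlx, h, if_false, List.mem_cons]
        constructor
        · intro hh; simp at hh
        · rintro (rfl | hh)
          · exact absurd rfl h
          · exact absurd hh hnm

theorem firstIdx?_occ (v : Int) (l : List Int) (i : Nat) (h : firstIdx? v l = some i) :
    i < l.length ∧ l.getD i 0 = v := by
  induction l generalizing i with
  | nil => simp [firstIdx?] at h
  | cons x xs ih =>
    by_cases hx : x = v
    · simp [firstIdx?, hx] at h; subst h; simp [hx]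
    · simp [firstIdx?, hx] at h
      rcases h with ⟨k, hk, rfl⟩
      rcases ih k hk with ⟨h1, h2⟩
      exact ⟨by simp; omega, by simpa [List.getD_cons_succ] using h2⟩

theorem lastIdx?_occ (v : Int) (l : List Int) (i : Nat) (h : lastIdx? v l = some i) :
    i < l.length ∧ l.getD i 0 = v := by
  induction l generalizing i with
  | nil => simp [lastIdx?] at h
  | cons x xs ih =>
    cases hlx : lastIdx? v xs with
    | some k =>
      simp [lastIdx?, hlx] at h; subst h
      rcases ih k hlx with ⟨h1, h2⟩
      exact ⟨by simp; omega, by simpa [List.getD_cons_succ] using h2⟩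
    | none =>
      by_cases hx : x = v <;> simp [lastIdx?, hlx, hx] at h
      subst h; simp [hx]

theorem firstIdx?_le (v : Int) (l : List Int) (i k : Nat) (h : firstIdx? v l = some i)
    (hk : k < l.length) (hv : l.getD k 0 = v) : i ≤ k := by
  induction l generalizing i k with
  | nil => simp at hk
  | cons x xs ih =>
    by_cases hx : x = v
    · simp [firstIdx?, hx] at h; omega
    · simp [firstIdx?, hx] at h
      rcases h with ⟨m, hm, rfl⟩
      cases k with
      | zero => simp at hv; exact absurd hv hx
      | succ k =>
        have := ih m k hm (by simp at hk; omega) (by simpa [List.getD_cons_succ] using hv)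
        omega

theorem le_lastIdx? (v : Int) (l : List Int) (i k : Nat) (h : lastIdx? v l = some i)
    (hk : k < l.length) (hv : l.getD k 0 = v) : k ≤ i := by
  induction l generalizing i k with
  | nil => simp at hk
  | cons x xs ih =>
    cases hlx : lastIdx? v xs with
    | some m =>
      simp [lastIdx?, hlx] at h; subst h
      cases k with
      | zero => omega
      | succ k =>
        have := ih m k hlx (by simp at hk; omega) (by simpa [List.getD_cons_succ] using hv)
        omega
    | none =>
      by_cases hx : x = v <;> simp [lastIdx?, hlx, hx] at h
      subst h
      cases k with
      | zero => omega
      | succ k =>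
        exfalso
        have hk' : k < xs.length := by simp at hk; omega
        have hv' : xs.getD k 0 = v := by simpa [List.getD_cons_succ] using hv
        have : v ∈ xs := by
          rw [← hv', List.getD_eq_getElem _ 0 hk']; exact List.getElem_mem hk'
        rw [← lastIdx?_isSome_iff] at this; simp [hlx] at this

-- membership in B's set of differences is exactly PairDiff
theorem mem_setB (l : List Int) (d : Int)
    (F1 F2 : PySem.Dict Int Int)
    (h1 : F1 = (PySem.List.enumerate l 0).foldl
        (fun d iv => if d.contains iv.2 then d else d.insert iv.2 iv.1) PySem.Dict.empty)
    (h2 : F2 = (PySem.List.enumerate l 0).foldl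
        (fun d iv => d.insert iv.2 iv.1) PySem.Dict.empty) :
    (d ∈ F1.keys.foldl (fun s p =>
        F2.keys.foldl (fun s q =>
          if F1.getD p 0 < F2.getD q 0 then PySem.Set.add s (q - p) else s) s)
        PySem.Set.empty) ↔ PairDiff d l := by
  have hF1 : ∀ v, F1.get? v = (firstIdx? v l).map (fun k => (k : Int)) := by
    intro v; rw [h1, first_fold_get]; simp
  have hF2 : ∀ v, F2.get? v = (lastIdx? v l).map (fun k => (k : Int)) := by
    intro v; rw [h2, last_fold_get]
    simp only [PySem.Dict.get?_empty]
    cases lastIdx? v l <;> simp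
  have key1 : ∀ v, v ∈ F1.keys ↔ v ∈ l := by
    intro v
    rw [← PySem.Dict.contains_iff_mem_keys, PySem.Dict.contains_eq_isSome_get?, hF1,
      ← firstIdx?_isSome_iff]
    cases firstIdx? v l <;> simp
  have key2 : ∀ v, v ∈ F2.keys ↔ v ∈ l := by
    intro v
    rw [← PySem.Dict.contains_iff_mem_keys, PySem.Dict.contains_eq_isSome_get?, hF2,
      ← lastIdx?_isSome_iff]
    cases lastIdx? v l <;> simp
  have gD1 : ∀ v i, firstIdx? v l = some i → F1.getD v 0 = (i : Int) := by
    intro v i h; rw [PySem.Dict.getD_eq_get?_getD, hF1, h]; rfl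
  have gD2 : ∀ v i, lastIdx? v l = some i → F2.getD v 0 = (i : Int) := by
    intro v i h; rw [PySem.Dict.getD_eq_get?_getD, hF2, h]; rfl
  rw [mem_foldl_grow _ (fun p d => ∃ q ∈ F2.keys, F1.getD p 0 < F2.getD q 0 ∧ d = q - p)
      (fun s p d => mem_foldl_grow _ (fun q d => F1.getD p 0 < F2.getD q 0 ∧ d = q - p)
        (fun s q d => by split_ifs with h <;> simp [PySem.Set.mem_add, h]) _ s d)]
  rw [pairdiff_iff_nat]
  simp only [PySem.Set.empty, List.not_mem_nil, false_or]
  constructor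
  · rintro ⟨p, hp, q, hq, hlt, rfl⟩
    rw [key1] at hp; rw [key2] at hq
    obtain ⟨fp, hfp⟩ := Option.isSome_iff_exists.mp ((firstIdx?_isSome_iff p l).mpr hp)
    obtain ⟨lq, hlq⟩ := Option.isSome_iff_exists.mp ((lastIdx?_isSome_iff q l).mpr hq)
    rw [gD1 p fp hfp, gD2 q lq hlq] at hlt
    obtain ⟨hfp1, hfp2⟩ := firstIdx?_occ p l fp hfp
    obtain ⟨hlq1, hlq2⟩ := lastIdx?_occ q l lq hlq
    exact ⟨fp, lq, by exact_mod_cast hlt, hlq1, by rw [hfp2, hlq2]⟩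
  · rintro ⟨i, j, hij, hj, rfl⟩
    have hi : i < l.length := by omega
    have hpi : l.getD i 0 ∈ l := by
      rw [List.getD_eq_getElem _ 0 hi]; exact List.getElem_mem hi
    have hqj : l.getD j 0 ∈ l := by
      rw [List.getD_eq_getElem _ 0 hj]; exact List.getElem_mem hj
    obtain ⟨fp, hfp⟩ := Option.isSome_iff_exists.mp ((firstIdx?_isSome_iff _ l).mpr hpi)
    obtain ⟨lq, hlq⟩ := Option.isSome_iff_exists.mp ((lastIdx?_isSome_iff _ l).mpr hqj)
    have h1le : fp ≤ i := firstIdx?_le _ l fp i hfp hi rfl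
    have h2le : j ≤ lq := le_lastIdx? _ l lq j hlq hj rfl
    refine ⟨l.getD i 0, (key1 _).mpr hpi, l.getD j 0, (key2 _).mpr hqj, ?_, rfl⟩
    rw [gD1 _ fp hfp, gD2 _ lq hlq]
    exact_mod_cast by omega

-- ===== VERDICT (by name: the statement is the Claim_ definition above) =====
theorem find_meeting_room_sizes_spec : Claim_equal_find_meeting_room_sizes := by
  intro W P pp _
  unfold Spec_find_meeting_room_sizes find_meeting_room_sizes find_meeting_room_sizes_alt
  dsimp only
  rw [PySem.List.foldl_prod_mk
      (f := fun d (iv : Int × Int) => if PySem.Dict.contains d iv.2 then d else d.insert iv.2 iv.1)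
      (g := fun d (iv : Int × Int) => PySem.Dict.insert d iv.2 iv.1)]
  apply PySem.List.sorted_eq_sorted_of_perm _ _ _ (fun a b h => h)
  rw [List.perm_ext_iff_of_nodup]
  · intro d
    rw [mem_setA, mem_setB ([0] ++ pp ++ [W]) d _ _ rfl rfl]
  · exact nodup_foldl_grow _ (fun s i hs => nodup_foldl_grow _
      (fun s j hs => PySem.Set.nodup_add _ _ hs) _ _ hs) _ _ List.nodup_nil
  · exact nodup_foldl_grow _ (fun s p hs => nodup_foldl_grow _
      (fun s q hs => by split_ifs with h; exacts [PySem.Set.nodup_add _ _ hs, hs]) _ _ hs)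
      _ _ List.nodup_nil
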